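-- pv_equiv track=rewrite | github.com/ProjectARCConeDetection/cone_detection | neural_net/convolutional.py | equaliseSet
-- ===== SOURCE A (Python) =====
-- def equaliseSet(set_X, set_Y):
--     #Count positives and negatives.
--     positives = 0; negatives = 0;
--     for element in set_Y:
--         if(element[0]): positives += 1
--         else: negatives += 1
--     #Find bias.
--     negative_bias = (negatives > (len(set_X)/2))
--     if(negative_bias): counter = positives
--     if(not negative_bias): counter = negatives
--     #Equalise.
--     equalised_x = []; equalised_y = [];
--     for index in range(0, len(set_X)-1):
--         if(counter <= 0 and negative_bias and set_Y[index][1]): continue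
--         if(counter <= 0 and not negative_bias and set_Y[index][0]): continue
--         equalised_x.append(set_X[index])
--         equalised_y.append(set_Y[index])
--         if(negative_bias and set_Y[index][1]): counter -= 1
--         if(not negative_bias and set_Y[index][0]): counter -= 1
--     return equalised_x, equalised_y
-- ===== SOURCE B (Python) =====
-- def equaliseSet(set_X, set_Y):
--     positives = sum(1 for row in set_Y if row[0])
--     negatives = len(set_Y) - positives
--     negative_bias = negatives > len(set_X) / 2
--     indicator = 1 if negative_bias else 0
--     quota = positives if negative_bias else negatives
--     n = len(set_X) - 1
--     majority = [i for i in range(0, n) if set_Y[i][indicator]]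
--     drop = set(majority[quota:])
--     keep = [i for i in range(0, n) if i not in drop]
--     return [set_X[i] for i in keep], [set_Y[i] for i in keep]
-- ===== Notes on version B (the rewrite author's own statement) =====
-- stated objective: alternative
-- what changed: Replaces A's single counter-decrementing filter loop by a precompute-then-emit decomposition: count the classes once, derive the majority indicator and quota, collect the majority-row positions, turn everything past the first quota of them into a drop-set, and emit the rows whose index is not in the drop-set.
import Mathlib
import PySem

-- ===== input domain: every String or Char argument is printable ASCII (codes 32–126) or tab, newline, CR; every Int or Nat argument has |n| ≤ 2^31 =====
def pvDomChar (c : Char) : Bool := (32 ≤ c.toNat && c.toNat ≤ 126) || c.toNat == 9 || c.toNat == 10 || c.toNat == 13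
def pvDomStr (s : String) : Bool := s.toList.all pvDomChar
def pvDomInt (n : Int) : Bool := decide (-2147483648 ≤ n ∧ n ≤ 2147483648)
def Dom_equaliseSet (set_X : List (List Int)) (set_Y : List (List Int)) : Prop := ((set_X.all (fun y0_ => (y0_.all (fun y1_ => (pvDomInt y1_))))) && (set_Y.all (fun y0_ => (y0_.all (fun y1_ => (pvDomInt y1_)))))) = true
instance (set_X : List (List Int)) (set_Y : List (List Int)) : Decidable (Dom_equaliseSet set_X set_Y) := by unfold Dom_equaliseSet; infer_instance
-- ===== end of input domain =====

-- B is the same balancing pass re-decomposed as count → quota → drop-set → emit (no running counter); equivalence is about the return value only.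

-- ===== PORT A =====
-- literal transliteration of A: counting fold, bias, then one filtered pass with a decrementing counter
def equaliseSet (set_X : List (List Int)) (set_Y : List (List Int)) : List (List Int) × List (List Int) :=
  let pn := set_Y.foldl
    (fun (pn : Int × Int) element =>
      if ((PySem.List.pyGet? element 0).getD 0) != 0 then (pn.1 + 1, pn.2) else (pn.1, pn.2 + 1))
    (0, 0)
  let positives := pn.1
  let negatives := pn.2
  let negative_bias : Bool := decide (2 * negatives > (set_X.length : Int))
  let counter : Int := if negative_bias then positives else negatives
  let st := (PySem.List.pyRange 0 ((set_X.length : Int) - 1) 1).foldl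
    (fun (st : List (List Int) × List (List Int) × Int) index =>
      let yrow := (PySem.List.pyGet? set_Y index).getD []
      if decide (st.2.2 ≤ 0) && negative_bias && (((PySem.List.pyGet? yrow 1).getD 0) != 0) then st
      else if decide (st.2.2 ≤ 0) && !negative_bias && (((PySem.List.pyGet? yrow 0).getD 0) != 0) then st
      else
        let ex := st.1 ++ [(PySem.List.pyGet? set_X index).getD []]
        let ey := st.2.1 ++ [yrow]
        let c1 := if negative_bias && (((PySem.List.pyGet? yrow 1).getD 0) != 0) then st.2.2 - 1 else st.2.2
        let c2 := if !negative_bias && (((PySem.List.pyGet? yrow 0).getD 0) != 0) then c1 - 1 else c1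
        (ex, ey, c2))
    ([], [], counter)
  (st.1, st.2.1)

-- ===== PORT B =====
-- transliteration of Source B: count → quota → majority positions → drop-set (a Python set) → emit
def equaliseSet_alt (set_X : List (List Int)) (set_Y : List (List Int)) : List (List Int) × List (List Int) :=
  let positives : Int := (set_Y.countP (fun row => ((PySem.List.pyGet? row 0).getD 0) != 0) : Int)
  let negatives : Int := (set_Y.length : Int) - positives
  let negative_bias : Bool := decide (2 * negatives > (set_X.length : Int))
  let indicator : Int := if negative_bias then 1 else 0
  let quota : Int := if negative_bias then positives else negatives
  let idxs := PySem.List.pyRange 0 ((set_X.length : Int) - 1) 1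
  let majority := idxs.filter
    (fun i => ((PySem.List.pyGet? ((PySem.List.pyGet? set_Y i).getD []) indicator).getD 0) != 0)
  let drop := PySem.Set.ofList (PySem.List.slice majority (some quota) none)
  let keep := idxs.filter (fun i => !(PySem.Set.contains drop i))
  (keep.map (fun i => (PySem.List.pyGet? set_X i).getD []),
   keep.map (fun i => (PySem.List.pyGet? set_Y i).getD []))

-- ===== PRECONDITION & SPEC =====
-- Pre_ excludes exactly the inputs where Python A raises an IndexError: an empty row in set_Y
-- (the counting pass reads element[0]), set_Y shorter than the index range, or — when the bias is
-- negative — a row among the first len(set_X)-1 of set_Y with fewer than 2 entries (A reads row[1]).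
def Pre_equaliseSet (set_X : List (List Int)) (set_Y : List (List Int)) : Prop :=
  (∀ y ∈ set_Y, y ≠ []) ∧
  set_X.length - 1 ≤ set_Y.length ∧
  (2 * ((set_Y.countP (fun y => y.headD 0 == 0)) : Int) > (set_X.length : Int) →
    ∀ y ∈ set_Y.take (set_X.length - 1), 2 ≤ y.length)
instance (set_X : List (List Int)) (set_Y : List (List Int)) : Decidable (Pre_equaliseSet set_X set_Y) := by
  unfold Pre_equaliseSet; infer_instance

def pvWitness_equaliseSet : List (List Int) × List (List Int) :=
  ([[1], [2], [3], [4]], [[1, 0], [0, 1], [0, 1], [1, 0]])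

def Spec_equaliseSet (set_X : List (List Int)) (set_Y : List (List Int)) (out : List (List Int) × List (List Int)) : Prop := out = equaliseSet_alt set_X set_Y
instance (set_X : List (List Int)) (set_Y : List (List Int)) (out : List (List Int) × List (List Int)) : Decidable (Spec_equaliseSet set_X set_Y out) := by unfold Spec_equaliseSet; infer_instance

-- ===== CLAIM (what is proved, stated in full; the proofs are below) =====
def Claim_equal_equaliseSet : Prop := ∀ (set_X : List (List Int)) (set_Y : List (List Int)), Dom_equaliseSet set_X set_Y → Pre_equaliseSet set_X set_Y → Spec_equaliseSet set_X set_Y (equaliseSet set_X set_Y)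


-- ===== LEMMAS AND PROOFS =====

-- the rows kept by one balancing pass with budget c: minority rows always, majority rows while budget > 0
def keepIdx (major : Int → Bool) : List Int → Int → List Int
  | [], _ => []
  | i :: L, c =>
    if major i then
      if c ≤ 0 then keepIdx major L c
      else i :: keepIdx major L (c - 1)
    else i :: keepIdx major L c

-- A's counting fold in closed form
theorem countPN (pred : List Int → Bool) :
    ∀ (ys : List (List Int)) (p n : Int),
    ys.foldl (fun (pn : Int × Int) el => if pred el then (pn.1 + 1, pn.2) else (pn.1, pn.2 + 1)) (p, n)
      = (p + (ys.countP pred : Int), n + ((ys.length : Int) - (ys.countP pred : Int))) := by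
  intro ys
  induction ys with
  | nil => intro p n; simp
  | cons y ys ih =>
    intro p n
    by_cases h : pred y <;> simp [h, ih] <;> omega

-- A's second loop (counter-driven) computes keepIdx
theorem foldA_keep (major : Int → Bool) (fx fy : Int → List Int) (L : List Int) :
    ∀ (ex ey : List (List Int)) (c : Int),
    (L.foldl (fun (st : List (List Int) × List (List Int) × Int) i =>
        if decide (st.2.2 ≤ 0) && major i then st
        else (st.1 ++ [fx i], st.2.1 ++ [fy i], if major i then st.2.2 - 1 else st.2.2))
      (ex, ey, c)).1 = ex ++ (keepIdx major L c).map fx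
    ∧ (L.foldl (fun (st : List (List Int) × List (List Int) × Int) i =>
        if decide (st.2.2 ≤ 0) && major i then st
        else (st.1 ++ [fx i], st.2.1 ++ [fy i], if major i then st.2.2 - 1 else st.2.2))
      (ex, ey, c)).2.1 = ey ++ (keepIdx major L c).map fy := by
  induction L with
  | nil => intro ex ey c; simp [keepIdx]
  | cons i L ih =>
    intro ex ey c
    by_cases hm : major i
    · by_cases hc : c ≤ 0
      · simpa [keepIdx, hm, hc] using ih ex ey c
      · simpa [keepIdx, hm, hc] using ih (ex ++ [fx i]) (ey ++ [fy i]) (c - 1)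
    · by_cases hc : c ≤ 0
      · simpa [keepIdx, hm, hc] using ih (ex ++ [fx i]) (ey ++ [fy i]) c
      · simpa [keepIdx, hm, hc] using ih (ex ++ [fx i]) (ey ++ [fy i]) c

-- B's drop-set pass computes keepIdx as well (for duplicate-free index lists)
theorem filter_drop_keep (major : Int → Bool) :
    ∀ (L : List Int), L.Nodup → ∀ (c : Int),
    L.filter (fun i => !(decide (i ∈ (L.filter major).drop c.toNat)))
      = keepIdx major L c := by
  intro L
  induction L with
  | nil => intro _ c; simp [keepIdx]
  | cons i L ih =>
    intro hnd c
    have hiL : i ∉ L := (List.nodup_cons.mp hnd).1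
    have hndL : L.Nodup := (List.nodup_cons.mp hnd).2
    by_cases hm : major i
    · by_cases hc : c ≤ 0
      · have htn : c.toNat = 0 := by omega
        rw [List.filter_cons, htn]
        simp only [List.filter_cons_of_pos hm, List.drop_zero]
        have hhead : (!(decide (i ∈ i :: L.filter major))) = false := by simp
        rw [hhead]
        simp only [if_neg Bool.false_ne_true]
        rw [List.filter_congr (q := fun j => !(decide (j ∈ (L.filter major).drop c.toNat)))]
        · rw [ih hndL c]
          simp [keepIdx, hm, hc]
        · intro j hj
          have hji : j ≠ i := fun h => hiL (h ▸ hj)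
          simp [htn, List.mem_cons, hji]
      · have htn : c.toNat = (c - 1).toNat + 1 := by omega
        rw [List.filter_cons]
        simp only [List.filter_cons_of_pos hm, htn, List.drop_succ_cons]
        have hhead : (!(decide (i ∈ (L.filter major).drop (c-1).toNat))) = true := by
          have h0 : i ∉ (L.filter major).drop (c-1).toNat := fun h =>
            hiL (List.mem_of_mem_filter (List.mem_of_mem_drop h))
          simpa using h0
        rw [hhead]
        rw [ih hndL (c - 1)]
        simp [keepIdx, hm, hc]
    · rw [List.filter_cons]
      simp only [List.filter_cons_of_neg hm]
      have hhead : (!(decide (i ∈ (L.filter major).drop c.toNat))) = true := by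
        have h0 : i ∉ (L.filter major).drop c.toNat := fun h =>
          hiL (List.mem_of_mem_filter (List.mem_of_mem_drop h))
        simpa using h0
      rw [hhead]
      rw [ih hndL c]
      simp [keepIdx, hm]

-- B's set-membership test is list membership of the distinct-element list
theorem set_contains_drop (D : List Int) (j : Int) :
    (!(PySem.Set.contains (PySem.Set.ofList D) j)) = (!(decide (j ∈ D))) := by
  by_cases h : j ∈ D <;>
    simp [PySem.Set.contains, PySem.Set.mem_ofList, h]

-- the two ports agree on every input
theorem ports_eq (X Y : List (List Int)) : equaliseSet X Y = equaliseSet_alt X Y := by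
  simp only [equaliseSet, equaliseSet_alt]
  rw [countPN]
  simp only [zero_add]
  set cnt := Y.countP (fun row => ((PySem.List.pyGet? row 0).getD 0) != 0) with hcnt
  set idxs := PySem.List.pyRange 0 ((X.length : Int) - 1) 1 with hidxs
  have hnd : idxs.Nodup := PySem.List.nodup_pyRange_one 0 ((X.length : Int) - 1)
  by_cases hb : (2 * ((Y.length : Int) - (cnt : Int)) > (X.length : Int))
  · have hd : (decide (2 * ((Y.length : Int) - (cnt : Int)) > (X.length : Int))) = true := by
      simpa using hb
    simp only [hd, Bool.and_true, Bool.not_true, Bool.and_false, Bool.false_and, Bool.true_and,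
      Bool.false_eq_true, if_false, if_true]
    set major := fun i => ((PySem.List.pyGet? ((PySem.List.pyGet? Y i).getD []) 1).getD 0) != 0 with hmaj
    rw [PySem.List.slice_from_natCast]
    have hB := filter_drop_keep major idxs hnd ((cnt : Int))
    simp only [Int.toNat_natCast] at hB
    have hBc : idxs.filter
        (fun i => !(PySem.Set.contains (PySem.Set.ofList ((idxs.filter major).drop cnt)) i))
        = keepIdx major idxs ((cnt : Int)) := by
      refine Eq.trans ?_ hB
      exact List.filter_congr (fun j _ => set_contains_drop _ j)
    rw [hBc]
    have hA := foldA_keep major (fun i => (PySem.List.pyGet? X i).getD [])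
      (fun i => (PySem.List.pyGet? Y i).getD []) idxs [] [] ((cnt : Int))
    exact Prod.ext (by rw [hA.1]; simp) (by rw [hA.2]; simp)
  · have hd : (decide (2 * ((Y.length : Int) - (cnt : Int)) > (X.length : Int))) = false := by
      simpa using hb
    simp only [hd, Bool.and_true, Bool.not_false, Bool.and_false, Bool.false_and, Bool.true_and,
      Bool.false_eq_true, if_false]
    set major := fun i => ((PySem.List.pyGet? ((PySem.List.pyGet? Y i).getD []) 0).getD 0) != 0 with hmaj
    have hle : cnt ≤ Y.length := List.countP_le_length
    have hq : ((Y.length : Int) - (cnt : Int)) = ((Y.length - cnt : Nat) : Int) := by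
      push_cast [hle]; ring
    rw [hq, PySem.List.slice_from_natCast]
    have hB := filter_drop_keep major idxs hnd (((Y.length - cnt : Nat) : Int))
    simp only [Int.toNat_natCast] at hB
    have hBc : idxs.filter
        (fun i => !(PySem.Set.contains (PySem.Set.ofList ((idxs.filter major).drop (Y.length - cnt))) i))
        = keepIdx major idxs (((Y.length - cnt : Nat) : Int)) := by
      refine Eq.trans ?_ hB
      exact List.filter_congr (fun j _ => set_contains_drop _ j)
    rw [hBc]
    have hA := foldA_keep major (fun i => (PySem.List.pyGet? X i).getD [])
      (fun i => (PySem.List.pyGet? Y i).getD []) idxs [] [] (((Y.length : Int) - (cnt : Int)))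
    rw [hq] at hA
    exact Prod.ext (by rw [hA.1]; simp) (by rw [hA.2]; simp)

-- ===== VERDICT (by name: the statement is the Claim_ definition above) =====
theorem equaliseSet_spec : Claim_equal_equaliseSet := by
  intro set_X set_Y _ _
  unfold Spec_equaliseSet
  exact ports_eq set_X set_Y
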